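-- pv_equiv track=rewrite | github.com/aadhithyaag/E-Comm-Inventory-Management-System | Invenory-Management/hexAndString.py | string2hex
-- ===== SOURCE A (Python) =====
-- bina={'0000':'0','0001':'1','0010':'2','0011':'3','0100':'4','0101':'5','0110':'6','0111':'7',
--     '1000':'8','1001':'9','1010':'a','1011':'b','1100':'c','1101':'d','1110':'e','1111':'f'}
--
-- def string2hex(string):
--     string_len=len(string)
--     string=[("00000000"+bin(ord(string[i]))[2:])[-8:] for i in range(string_len)]
--     string=''.join(string)
--     he=""
--     for i in range(0,string_len*8,4):
--         he+=bina[string[i:i+4]]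
--     temp=16-(len(he)%16)
--     he+="0"*temp
--     res=[he[i:i+16] for i in range(0,len(he),16)] + [("0"*16+(hex(temp))[2:])[-16:]]
--     return res
-- ===== SOURCE B (Python) =====
-- def string2hex(string):
--     n = len(string)
--     temp = 16 - (2 * n) % 16
--     he = ''.join(format(ord(c) & 0xFF, '02x') for c in string) + '0' * temp
--     return [he[16 * k:16 * k + 16] for k in range(n // 8 + 1)] + [format(temp, '016x')]
-- ===== Notes on version B (the rewrite author's own statement) =====
-- stated objective: faster
-- what changed: B formats each character directly as two hex digits in one pass (dropping A's per-char 8-bit binary expansion and the 4-bit-slice/dict-lookup collapsing loop and its quadratic 'he +=' string accumulation) and computes the padded block count arithmetically instead of re-scanning the padded string.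
import Mathlib
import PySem

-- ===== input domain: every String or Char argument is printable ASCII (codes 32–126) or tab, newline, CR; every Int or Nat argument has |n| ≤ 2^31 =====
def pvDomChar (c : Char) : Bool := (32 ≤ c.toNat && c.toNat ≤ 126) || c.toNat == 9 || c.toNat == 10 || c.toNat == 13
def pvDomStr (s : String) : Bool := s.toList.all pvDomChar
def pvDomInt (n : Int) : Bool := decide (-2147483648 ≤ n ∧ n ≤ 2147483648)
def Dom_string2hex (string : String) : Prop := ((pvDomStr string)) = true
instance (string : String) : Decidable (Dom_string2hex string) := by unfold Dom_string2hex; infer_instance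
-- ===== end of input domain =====

-- B replaces A's expand-to-bits-then-collapse-nibbles pipeline by direct two-hex-digit
-- formatting of each character in one pass, with the block count computed arithmetically.

-- shared helper: the lowercase hex digits of a nonnegative int — what Python's hex(n)[2:]
-- and format(n,'x') produce for 0 ≤ n (exact there; fuel makes the recursion structural)
def hexDigitChar (d : Nat) : Char := if d < 10 then Char.ofNat (48 + d) else Char.ofNat (87 + d)
def hexAux : Nat → Nat → List Char
  | 0, _ => []
  | fuel + 1, n => if n < 16 then [hexDigitChar n] else hexAux fuel (n / 16) ++ [hexDigitChar (n % 16)]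
def hexNatChars (n : Nat) : List Char := hexAux (n + 1) n

-- ===== PORT A =====
def bina : PySem.Dict (List Char) Char := PySem.Dict.ofList
  [("0000".toList, '0'), ("0001".toList, '1'), ("0010".toList, '2'), ("0011".toList, '3'),
   ("0100".toList, '4'), ("0101".toList, '5'), ("0110".toList, '6'), ("0111".toList, '7'),
   ("1000".toList, '8'), ("1001".toList, '9'), ("1010".toList, 'a'), ("1011".toList, 'b'),
   ("1100".toList, 'c'), ("1101".toList, 'd'), ("1110".toList, 'e'), ("1111".toList, 'f')]

def string2hex (string : String) : List String :=
  let cs := string.toList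
  let string_len : Int := PySem.List.len cs
  -- [("00000000"+bin(ord(string[i]))[2:])[-8:] for i in range(string_len)]
  let bits := (PySem.List.pyRange 0 string_len 1).map (fun i =>
    PySem.List.slice
      ("00000000".toList ++
        PySem.List.slice (PySem.Int.toBinChars0b ((PySem.List.pyGetD cs i ' ').toNat : Int)) (some 2) none)
      (some (-8)) none)
  let joined := PySem.Chars.join [] bits        -- ''.join(string)
  -- for i in range(0, string_len*8, 4): he += bina[string[i:i+4]]
  -- bina[…]: the key (a 4-char slice of an 8·len binary string) is always present, so getD never uses its default
  let he := (PySem.List.pyRange 0 (string_len * 8) 4).foldl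
    (fun acc i => acc ++ [PySem.Dict.getD bina (PySem.List.slice joined (some i) (some (i + 4))) ' ']) []
  let temp : Int := 16 - PySem.Int.mod (PySem.List.len he) 16
  let he2 := he ++ PySem.List.pyRepeat ['0'] temp     -- he += "0"*temp
  ((PySem.List.pyRange 0 (PySem.List.len he2) 16).map (fun i =>
      String.ofList (PySem.List.slice he2 (some i) (some (i + 16)))))
    ++ [String.ofList (PySem.List.slice (List.replicate 16 '0' ++ hexNatChars temp.toNat) (some (-16)) none)]

-- ===== PORT B =====
def byteHexChars (b : Nat) : List Char := [hexDigitChar (b / 16), hexDigitChar (b % 16)]  -- format(b,'02x'), exact for b < 256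

def string2hex_alt (string : String) : List String :=
  let cs := string.toList
  let n := cs.length
  let temp : Int := 16 - PySem.Int.mod (2 * (n : Int)) 16
  let he := cs.flatMap (fun c => byteHexChars (c.toNat &&& 255)) ++ PySem.List.pyRepeat ['0'] temp
  ((List.range (n / 8 + 1)).map (fun k =>
      String.ofList (PySem.List.slice he (some ((16 * k : Nat) : Int)) (some (((16 * k : Nat) : Int) + 16)))))
    ++ [String.ofList (PySem.Chars.zfill (hexNatChars temp.toNat) 16)]   -- format(temp,'016x')

-- ===== PRECONDITION & SPEC =====
def Spec_string2hex (string : String) (out : List String) : Prop := out = string2hex_alt string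
instance (string : String) (out : List String) : Decidable (Spec_string2hex string out) := by unfold Spec_string2hex; infer_instance

-- ===== CLAIM (what is proved, stated in full; the proofs are below) =====
def Claim_equal_string2hex : Prop := ∀ (string : String), Dom_string2hex string → Spec_string2hex string (string2hex string)

-- ===== LEMMAS AND PROOFS =====

-- the 8-bit block A builds for a character of code m
def bitsOfNat (m : Nat) : List Char :=
  PySem.List.slice
    ("00000000".toList ++ PySem.List.slice (PySem.Int.toBinChars0b (m : Int)) (some 2) none)
    (some (-8)) none

set_option maxRecDepth 8192 in
lemma char_fact : ∀ m : Nat, m < 128 →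
    (bitsOfNat m).length = 8 ∧
    [PySem.Dict.getD bina ((bitsOfNat m).take 4) ' ',
     PySem.Dict.getD bina (List.take 4 ((bitsOfNat m).drop 4)) ' '] = byteHexChars (m &&& 255) := by
  decide

set_option maxRecDepth 2048 in
lemma tail_fact : ∀ t : Nat, t < 17 → 0 < t →
    PySem.List.slice (List.replicate 16 '0' ++ hexNatChars t) (some (-16)) none =
    PySem.Chars.zfill (hexNatChars t) 16 := by
  decide

-- ''.join with empty separator is flatten
lemma join_nil_flatten (bs : List (List Char)) : PySem.Chars.join [] bs = bs.flatten := by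
  unfold PySem.Chars.join List.intercalate
  induction bs with
  | nil => rfl
  | cons b t ih => cases t <;> simp_all [List.intersperse]

-- the indexed comprehension [g(cs[i]) for i in range(len(cs))] is a map
lemma map_idx {β : Type} (g : Char → β) (cs : List Char) (d : Char) :
    (PySem.List.pyRange 0 (PySem.List.len cs) 1).map (fun i => g (PySem.List.pyGetD cs i d)) = cs.map g := by
  rw [PySem.List.len_eq, PySem.List.pyRange_zero_natCast, List.map_map]
  simp only [Function.comp_def, PySem.List.pyGetD_natCast]
  induction cs with
  | nil => rfl
  | cons c t ih =>
    simp only [List.length_cons, List.range_succ_eq_map, List.map_cons, List.map_map,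
      List.getD_cons_zero, Function.comp_def, List.getD_cons_succ]
    exact congrArg _ ih

lemma range4_lemma (n : Nat) :
    PySem.List.pyRange 0 ((n:Int)*8) 4 = (List.range (2*n)).map (fun k : Nat => (0:Int) + 4*(k:Int)) := by
  rw [PySem.List.pyRange_of_pos 0 (↑n*8) (by omega)]
  rcases Nat.eq_zero_or_pos n with h | h
  · simp [h]
  · rw [if_pos (by positivity)]
    have h1 : ((n:Int)*8 - 0 + 4 - 1)/4 = 2*(n:Int) := by omega
    have h2 : ((2:Int)*(n:Int)).toNat = 2*n := by omega
    rw [h1, h2]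

lemma range16_lemma (K : Nat) (hK : 0 < K) :
    PySem.List.pyRange 0 ((16*K : Nat) : Int) 16 = (List.range K).map (fun k : Nat => (0:Int) + 16*(k:Int)) := by
  rw [PySem.List.pyRange_of_pos 0 _ (by omega), if_pos (by exact_mod_cast by omega : (0:Int) < ((16*K:Nat):Int))]
  have h1 : (((16*K:Nat):Int) - 0 + 16 - 1)/16 = (K:Int) := by push_cast; omega
  have h2 : ((K:Nat):Int).toNat = K := by omega
  rw [h1, h2]

theorem nibbles_lemma (f : List Char → Char) : ∀ (bs : List (List Char)), (∀ b ∈ bs, b.length = 8) →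
    (List.range (2 * bs.length)).map (fun k => f (List.take 4 (List.drop (4*k) bs.flatten))) =
    bs.flatMap (fun b => [f (b.take 4), f (List.take 4 (b.drop 4))]) := by
  intro bs
  induction bs with
  | nil => intro _; rfl
  | cons b t ih =>
    intro h
    have hb : b.length = 8 := h b (by simp)
    have ht := ih (fun x hx => h x (by simp [hx]))
    have hrange : 2 * (b :: t).length = 2 + 2 * t.length := by simp; omega
    have e0 : List.take 4 (List.drop (4*0) (b ++ t.flatten)) = b.take 4 := by
      simp [List.take_append_of_le_length (by omega : 4 <= b.length)]
    have e1 : List.take 4 (List.drop (4*1) (b ++ t.flatten)) = List.take 4 (b.drop 4) := by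
      rw [show 4*1 = 4 from rfl,
        List.drop_append_of_le_length (by omega : 4 <= b.length),
        List.take_append_of_le_length (by simp [hb] : 4 <= (b.drop 4).length)]
    have e2 : forall k : Nat, List.take 4 (List.drop (4*(2+k)) (b ++ t.flatten)) = List.take 4 (List.drop (4*k) t.flatten) := by
      intro k
      rw [List.drop_append, List.drop_eq_nil_of_le (by omega), List.nil_append]
      congr 2
      omega
    rw [hrange, List.range_add, List.map_append, List.map_map, List.flatMap_cons, List.flatten_cons]
    congr 1
    · rw [show List.range 2 = [0, 1] from rfl]
      simp only [List.map_cons, List.map_nil, e0, e1]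
    · rw [← ht]
      apply List.map_congr_left
      intro k hk
      simp only [Function.comp_apply, e2 k]

-- A's nibble-collapsing loop over the joined bit string, computed per character
lemma heA_lemma (cs : List Char) (h : ∀ c ∈ cs, c.toNat < 128) :
    (PySem.List.pyRange 0 (PySem.List.len cs * 8) 4).foldl
      (fun acc i => acc ++
        [PySem.Dict.getD bina
          (PySem.List.slice ((cs.map (fun c => bitsOfNat c.toNat)).flatten) (some i) (some (i + 4))) ' ']) [] =
    cs.flatMap (fun c => byteHexChars (c.toNat &&& 255)) := by
  have hlen8 : ∀ b ∈ cs.map (fun c => bitsOfNat c.toNat), b.length = 8 := by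
    intro b hb
    obtain ⟨c, hc, rfl⟩ := List.mem_map.mp hb
    exact (char_fact c.toNat (h c hc)).1
  rw [PySem.List.len_eq, range4_lemma, List.foldl_map, PySem.List.foldl_append_singleton_eq_map,
    List.nil_append]
  have hmc : ∀ k ∈ List.range (2 * cs.length),
      PySem.Dict.getD bina
        (PySem.List.slice ((cs.map (fun c => bitsOfNat c.toNat)).flatten)
          (some ((0:Int) + 4*(k:Int))) (some ((0:Int) + 4*(k:Int) + 4))) ' ' =
      PySem.Dict.getD bina
        (List.take 4 (List.drop (4*k) ((cs.map (fun c => bitsOfNat c.toNat)).flatten))) ' ' := by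
    intro k _
    have e : ((0:Int) + 4*(k:Int)) = ((4*k : Nat) : Int) := by push_cast; ring
    rw [e, show ((4*k:Nat):Int) + 4 = ((4*k:Nat):Int) + ((4:Nat):Int) from by norm_num,
      PySem.List.slice_natCast_add]
  rw [List.map_congr_left hmc,
    show 2*cs.length = 2*((cs.map (fun c => bitsOfNat c.toNat)).length) from by simp,
    nibbles_lemma (fun x => PySem.Dict.getD bina x ' ') _ hlen8, List.flatMap_map]
  clear hmc hlen8
  induction cs with
  | nil => rfl
  | cons c t ih =>
    rw [List.flatMap_cons, List.flatMap_cons, ih (fun x hx => h x (by simp [hx]))]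
    exact congrArg (· ++ _) ((char_fact c.toNat (h c (by simp))).2)

set_option maxHeartbeats 2000000 in
theorem string2hex_spec : Claim_equal_string2hex := by
  intro string hdom
  unfold Spec_string2hex
  have hchars : ∀ c ∈ string.toList, c.toNat < 128 := by
    intro c hc
    have := List.all_eq_true.mp hdom c hc
    simp only [pvDomChar, Bool.or_eq_true, Bool.and_eq_true, decide_eq_true_eq, beq_iff_eq] at this
    omega
  simp only [string2hex, string2hex_alt]
  have hbits : List.map (fun i =>
      PySem.List.slice
        ("00000000".toList ++
          PySem.List.slice (PySem.Int.toBinChars0b ((PySem.List.pyGetD string.toList i ' ').toNat : Int)) (some 2) none)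
        (some (-8)) none) (PySem.List.pyRange 0 (PySem.List.len string.toList) 1)
      = string.toList.map (fun c => bitsOfNat c.toNat) :=
    map_idx (fun c => bitsOfNat c.toNat) string.toList ' '
  rw [hbits, join_nil_flatten, heA_lemma string.toList hchars]
  have hlenH : PySem.List.len (string.toList.flatMap (fun c => byteHexChars (c.toNat &&& 255)))
      = 2 * (string.toList.length : Int) := by
    rw [PySem.List.len_eq]
    have : (string.toList.flatMap (fun c => byteHexChars (c.toNat &&& 255))).length
        = 2 * string.toList.length := by
      simp [List.length_flatMap, byteHexChars]; omega
    rw [this]; push_cast; ring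
  rw [hlenH]
  have hMeq : PySem.Int.mod (2 * (string.toList.length : Int)) 16
      = (2 * (string.toList.length : Int)) % 16 := PySem.Int.mod_eq_emod_of_pos (by omega)
  have hlen2 : (List.flatMap (fun c => byteHexChars (c.toNat &&& 255)) string.toList ++
      PySem.List.pyRepeat ['0'] (16 - PySem.Int.mod (2 * (string.toList.length : Int)) 16)).length
      = 16 * (string.toList.length / 8 + 1) := by
    rw [List.length_append, PySem.List.pyRepeat_singleton, List.length_replicate]
    have h1 : (List.flatMap (fun c => byteHexChars (c.toNat &&& 255)) string.toList).length
        = 2 * string.toList.length := by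
      simp [List.length_flatMap, byteHexChars]; omega
    rw [h1, hMeq]
    omega
  rw [PySem.List.len_eq, hlen2, range16_lemma _ (by omega), List.map_map]
  congr 1
  · apply List.map_congr_left
    intro k hk
    simp only [Function.comp_apply]
    have e : ((0:Int) + 16*(k:Int)) = ((16*k : Nat) : Int) := by push_cast; ring
    rw [e]
  · have ht1 : 0 < (16 - PySem.Int.mod (2 * (string.toList.length : Int)) 16).toNat := by
      rw [hMeq]; omega
    have ht2 : (16 - PySem.Int.mod (2 * (string.toList.length : Int)) 16).toNat < 17 := by
      rw [hMeq]; omega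
    rw [tail_fact _ ht2 ht1]
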